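-- pv_equiv track=rewrite | github.com/xFarid6/The-p3vs-game | FlappyBird/codewars_2.py | nines
-- ===== SOURCE A (Python) =====
-- def nines(n):
--     s, r = str(n), 0
--     for i, d in enumerate(s):
--         r += int(d) * 9 ** (len(s) - i - 1)
--         if d == '9':
--             r -= 1
--             break
--     return n - r
-- ===== SOURCE B (Python) =====
-- def nines(n):
--     # count of k in 1..n containing a '9' = n minus the count of no-9 numbers in 1..n;
--     # the latter is the base-9 reading of the largest no-9 number <= n, obtained by
--     # clamping the decimal string at its first '9' (it and everything after -> '8').
--     s = list(str(n))
--     for i, c in enumerate(s):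
--         if c == '9':
--             s[i:] = '8' * (len(s) - i)
--             break
--     v = 0
--     for c in s:
--         v = 9 * v + int(c)
--     return n - v
-- ===== Notes on version B (the rewrite author's own statement) =====
-- stated objective: simpler
-- what changed: B replaces A's positional digit*9**k summation with early break by clamping the decimal string at its first '9' (it and everything after becomes '8') and reading the result as a base-9 number with a single left-to-right fold; Pre_ excludes negative n, on which both A and B raise ValueError at int('-').
import Mathlib
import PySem

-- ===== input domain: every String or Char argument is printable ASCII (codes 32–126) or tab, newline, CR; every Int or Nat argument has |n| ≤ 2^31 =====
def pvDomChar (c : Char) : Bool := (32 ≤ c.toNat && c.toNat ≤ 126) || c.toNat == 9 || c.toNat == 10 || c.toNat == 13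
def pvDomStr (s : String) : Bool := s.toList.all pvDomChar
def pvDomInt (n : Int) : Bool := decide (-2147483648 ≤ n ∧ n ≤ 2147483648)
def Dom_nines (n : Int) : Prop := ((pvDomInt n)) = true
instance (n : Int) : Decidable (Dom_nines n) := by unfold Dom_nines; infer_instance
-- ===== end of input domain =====

-- B counts the no-9 numbers by clamping the decimal string at its first '9' and
-- reading it as a base-9 number with one fold, instead of A's positional
-- digit*9**k summation loop (objective: simpler).


-- int(d) for a single decimal-digit character d (exact on '0'..'9', the only chars
-- reached inside Pre_)
def pvDig (c : Char) : Int := (c.toNat : Int) - 48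

-- ===== PORT A =====
-- the enumerate loop: i is the index, r the accumulator, len = len(s); the 'break'
-- on d == '9' becomes returning immediately
def ninesLoop (len : Int) : List Char → Int → Int → Int
  | [], _, r => r
  | d :: rest, i, r =>
      let r' := r + pvDig d * 9 ^ (len - i - 1).toNat
      if d = '9' then r' - 1 else ninesLoop len rest (i + 1) r'

def nines (n : Int) : Int :=
  let s := PySem.Int.toChars n
  n - ninesLoop (PySem.List.len s) s 0 0

-- ===== PORT B =====
-- the clamping loop of Source B: replace the first '9' and everything after it by '8'
def clamp9 : List Char → List Char
  | [] => []
  | c :: rest => if c = '9' then '8' :: rest.map (fun _ => '8') else c :: clamp9 rest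

-- Source B's second loop: v = 9*v + int(c)
def pvVal9 (cs : List Char) : Int := cs.foldl (fun a c => 9 * a + pvDig c) 0

def nines_alt (n : Int) : Int :=
  n - pvVal9 (clamp9 (PySem.Int.toChars n))

-- ===== PRECONDITION & SPEC =====
-- Pre_ excludes exactly the inputs on which A raises: for n < 0, A's loop reaches
-- int('-') and raises ValueError (B raises there the same way).
def Pre_nines (n : Int) : Prop := 0 ≤ n
instance (n : Int) : Decidable (Pre_nines n) := by unfold Pre_nines; infer_instance
def pvWitness_nines : Int := 19

def Spec_nines (n : Int) (out : Int) : Prop := out = nines_alt n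
instance (n : Int) (out : Int) : Decidable (Spec_nines n out) := by unfold Spec_nines; infer_instance

-- ===== CLAIM (what is proved, stated in full; the proofs are below) =====
def Claim_equal_nines : Prop := ∀ (n : Int), Dom_nines n → Pre_nines n → Spec_nines n (nines n)

-- ===== LEMMAS AND PROOFS =====

-- what A's loop adds for a suffix, with the exponent expressed structurally
def f9 : List Char → Int
  | [] => 0
  | d :: rest => if d = '9' then pvDig d * 9 ^ rest.length - 1
                 else pvDig d * 9 ^ rest.length + f9 rest

theorem ninesLoop_eq_f9 (s : List Char) : ∀ (i r : Int),
    ninesLoop (i + (s.length : Int)) s i r = r + f9 s := by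
  induction s with
  | nil => intro i r; simp [ninesLoop, f9]
  | cons d rest ih =>
    intro i r
    have he : (i + ((d :: rest).length : Int) - i - 1).toNat = rest.length := by
      simp only [List.length_cons]; omega
    simp only [ninesLoop]
    rw [he]
    by_cases hd : d = '9'
    · rw [if_pos hd]
      simp only [f9, if_pos hd]; ring
    · rw [if_neg hd]
      have harg : i + ((d :: rest).length : Int) = (i + 1) + (rest.length : Int) := by
        simp only [List.length_cons]; push_cast; ring
      rw [harg, ih (i + 1)]
      simp only [f9, if_neg hd]; ring

theorem foldl_val9_shift (cs : List Char) : ∀ (a : Int),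
    cs.foldl (fun a c => 9 * a + pvDig c) a = a * 9 ^ cs.length + pvVal9 cs := by
  induction cs with
  | nil => intro a; simp [pvVal9]
  | cons c rest ih =>
    intro a
    have hc : pvVal9 (c :: rest) = (9 * 0 + pvDig c) * 9 ^ rest.length + pvVal9 rest := ih _
    calc (c :: rest).foldl (fun a c => 9 * a + pvDig c) a
        = rest.foldl (fun a c => 9 * a + pvDig c) (9 * a + pvDig c) := List.foldl_cons ..
      _ = (9 * a + pvDig c) * 9 ^ rest.length + pvVal9 rest := ih _
      _ = a * 9 ^ (c :: rest).length + pvVal9 (c :: rest) := by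
            rw [hc]; simp only [List.length_cons, pow_succ]; ring

theorem val9_cons (c : Char) (cs : List Char) :
    pvVal9 (c :: cs) = pvDig c * 9 ^ cs.length + pvVal9 cs := by
  calc pvVal9 (c :: cs)
      = cs.foldl (fun a c => 9 * a + pvDig c) (9 * 0 + pvDig c) := rfl
    _ = (9 * 0 + pvDig c) * 9 ^ cs.length + pvVal9 cs := foldl_val9_shift cs _
    _ = pvDig c * 9 ^ cs.length + pvVal9 cs := by ring

theorem val9_all8 (l : List Char) :
    pvVal9 (l.map (fun _ => '8')) = 9 ^ l.length - 1 := by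
  induction l with
  | nil => simp [pvVal9]
  | cons c rest ih =>
    simp only [List.map_cons, val9_cons, List.length_map, ih, List.length_cons]
    have : pvDig '8' = 8 := by decide
    rw [this, pow_succ]; ring

theorem clamp9_length (cs : List Char) : (clamp9 cs).length = cs.length := by
  induction cs with
  | nil => rfl
  | cons c rest ih =>
    by_cases h : c = '9' <;> simp [clamp9, h, ih]

theorem val9_clamp9 (cs : List Char) : pvVal9 (clamp9 cs) = f9 cs := by
  induction cs with
  | nil => rfl
  | cons c rest ih =>
    by_cases h : c = '9'
    · subst h
      have hc : clamp9 ('9' :: rest) = '8' :: rest.map (fun _ => '8') := by simp [clamp9]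
      have hf : f9 ('9' :: rest) = pvDig '9' * 9 ^ rest.length - 1 := by simp [f9]
      rw [hc, hf, val9_cons, List.length_map, val9_all8]
      have h8 : pvDig '8' = 8 := by decide
      have h9 : pvDig '9' = 9 := by decide
      rw [h8, h9]; ring
    · have hc : clamp9 (c :: rest) = c :: clamp9 rest := by simp [clamp9, h]
      have hf : f9 (c :: rest) = pvDig c * 9 ^ rest.length + f9 rest := by simp [f9, h]
      rw [hc, hf, val9_cons, clamp9_length, ih]

-- ===== VERDICT (by name: the statement is the Claim_ definition above) =====
theorem nines_spec : Claim_equal_nines := by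
  intro n _ _
  unfold Spec_nines nines nines_alt
  have hA : ninesLoop (PySem.List.len (PySem.Int.toChars n)) (PySem.Int.toChars n) 0 0
      = f9 (PySem.Int.toChars n) := by
    have := ninesLoop_eq_f9 (PySem.Int.toChars n) 0 0
    simpa [PySem.List.len_eq] using this
  simp only [hA, val9_clamp9]
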